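-- pv_equiv track=rewrite | github.com/AsrtoMichi/mathematical-systems-solver | Sistems_solver.py | name_variable
-- ===== SOURCE A (Python) =====
-- def name_variable(number, number2):
--     base_a = ord('a')
--     quotient, remainder = divmod(number, 26)
--     letter = chr(remainder + base_a)
--
--     while quotient > 0:
--         quotient, remainder = divmod(quotient, 26)
--         letter = chr(base_a + remainder) + letter
--
--     letter = letter + "'" * number2 + ": "
--     return letter
-- ===== SOURCE B (Python) =====
-- def name_variable(number, number2):
--     def digits(n):
--         q, r = divmod(n, 26)
--         return (digits(q) if q > 0 else '') + chr(ord('a') + r)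
--     return digits(number) + "'" * number2 + ": "
-- ===== Notes on version B (the rewrite author's own statement) =====
-- stated objective: simpler
-- what changed: The prepend-in-a-while-loop over the quotient is replaced by a recursive digits helper that recurses on the quotient first and appends the current digit, so the string is built front-to-back by recursion instead of back-to-front by iteration.
import Mathlib
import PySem

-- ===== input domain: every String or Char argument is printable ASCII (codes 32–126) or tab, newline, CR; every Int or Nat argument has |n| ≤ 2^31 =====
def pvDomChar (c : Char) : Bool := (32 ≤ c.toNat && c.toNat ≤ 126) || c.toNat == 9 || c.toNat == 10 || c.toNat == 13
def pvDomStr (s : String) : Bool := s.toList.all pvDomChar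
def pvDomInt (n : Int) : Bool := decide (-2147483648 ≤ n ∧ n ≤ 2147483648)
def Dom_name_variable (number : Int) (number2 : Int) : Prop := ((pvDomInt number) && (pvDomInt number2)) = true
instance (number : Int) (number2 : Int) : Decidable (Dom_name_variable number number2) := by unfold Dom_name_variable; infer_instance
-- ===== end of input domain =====

-- B replaces A's prepend-in-a-while-loop with a recursive digits helper (recurse on the
-- quotient, append the digit); same return value, objective: simpler decomposition.

-- ===== PORT A =====
-- termination helper for the while loop: the quotient strictly shrinks
theorem pvFloordiv26_lt (q : Int) (h : q > 0) :
    (PySem.Int.floordiv q 26).toNat < q.toNat := by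
  rw [PySem.Int.floordiv_eq_ediv_of_pos (by norm_num)]
  omega

-- the 'while quotient > 0' loop: state = (quotient, letter)
def nvLoop (quotient : Int) (letter : List Char) : List Char :=
  if h : quotient > 0 then
    nvLoop (PySem.Int.floordiv quotient 26)
      (Char.ofNat (97 + PySem.Int.mod quotient 26).toNat :: letter)
  else letter
termination_by quotient.toNat
decreasing_by exact pvFloordiv26_lt quotient h

def name_variable (number : Int) (number2 : Int) : String :=
  let quotient := PySem.Int.floordiv number 26
  let remainder := PySem.Int.mod number 26
  let letter : List Char := [Char.ofNat (remainder + 97).toNat]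
  let letter := nvLoop quotient letter
  String.mk (letter ++ List.replicate number2.toNat '\'' ++ (": ").toList)

-- ===== PORT B =====
-- recursive digits helper: q,r = divmod(n,26); (digits(q) if q>0 else '') + chr(ord('a')+r)
def nvDigits (n : Int) : List Char :=
  let q := PySem.Int.floordiv n 26
  let r := PySem.Int.mod n 26
  (if q > 0 then nvDigits q else []) ++ [Char.ofNat (97 + r).toNat]
termination_by n.toNat
decreasing_by
  have h26 : (0:Int) < 26 := by norm_num
  have := PySem.Int.floordiv_eq_ediv_of_pos (a := n) h26
  omega

def name_variable_alt (number : Int) (number2 : Int) : String :=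
  String.mk (nvDigits number ++ List.replicate number2.toNat '\'' ++ (": ").toList)

-- ===== PRECONDITION & SPEC =====
def Spec_name_variable (number : Int) (number2 : Int) (out : String) : Prop := out = name_variable_alt number number2
instance (number : Int) (number2 : Int) (out : String) : Decidable (Spec_name_variable number number2 out) := by unfold Spec_name_variable; infer_instance

-- ===== CLAIM (what is proved, stated in full; the proofs are below) =====
def Claim_equal_name_variable : Prop := ∀ (number : Int) (number2 : Int), Dom_name_variable number number2 → Spec_name_variable number number2 (name_variable number number2)

-- ===== LEMMAS AND PROOFS =====

-- the loop with accumulator acc equals B's digit block (when entered) followed by acc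
theorem nvLoop_eq_digits (q : Int) (acc : List Char) :
    nvLoop q acc = (if q > 0 then nvDigits q else []) ++ acc := by
  by_cases h : q > 0
  · rw [nvLoop]
    simp only [h, dif_pos, if_pos]
    rw [nvLoop_eq_digits (PySem.Int.floordiv q 26)]
    conv_rhs => rw [nvDigits]
    simp only [dite_eq_ite, List.append_assoc, List.cons_append, List.nil_append]
  · rw [nvLoop]
    simp [h]
termination_by q.toNat
decreasing_by exact pvFloordiv26_lt q h

-- ===== VERDICT (by name: the statement is the Claim_ definition above) =====
theorem name_variable_spec : Claim_equal_name_variable := by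
  intro number number2 _
  unfold Spec_name_variable name_variable name_variable_alt
  simp only
  rw [nvLoop_eq_digits]
  conv_rhs => rw [nvDigits]
  simp only [List.append_assoc]
  have : (97 + PySem.Int.mod number 26) = (PySem.Int.mod number 26 + 97) := by ring
  rw [this]
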